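-- pv_equiv track=rewrite | github.com/unRekable/SqueezeFlow-Trader | data/loaders/symbol_discovery.py | _validate_symbol_match
-- ===== SOURCE A (Python) =====
-- def _validate_symbol_match(market_clean: str, symbol: str) -> bool:
--     """Validate that the symbol match is correct and not a false positive"""
--
--     # Check against common quote currencies to ensure it's a proper pair
--     quote_currencies = ['USDT', 'USDC', 'USD', 'EUR', 'BTC', 'ETH', 'BUSD', 'FDUSD']
--
--     for quote in quote_currencies:
--         # Check if market follows pattern: SYMBOL + QUOTE
--         expected_pattern = f"{symbol}{quote}"
--         if market_clean == expected_pattern: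
--             return True
--
--         # Check dash-separated format: SYMBOL-QUOTE
--         expected_dash = f"{symbol}-{quote}"
--         if market_clean == expected_dash:
--             return True
--
--     # Additional patterns for derivatives
--     derivative_patterns = [
--         f"{symbol}F0:USTF0",  # Bitfinex futures
--         f"{symbol}-PERPETUAL", # Deribit
--         f"{symbol}_USDT",      # Underscore format
--         f"{symbol}_USD"
--     ]
--
--     for pattern in derivative_patterns:
--         if market_clean == pattern:
--             return True
--
--     return False
-- ===== SOURCE B (Python) =====
-- _QUOTES = ['USDT', 'USDC', 'USD', 'EUR', 'BTC', 'ETH', 'BUSD', 'FDUSD']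
-- _SUFFIXES = [p for q in _QUOTES for p in (q, '-' + q)] + \
--             ['F0:USTF0', '-PERPETUAL', '_USDT', '_USD']
--
--
-- def _validate_symbol_match(market_clean: str, symbol: str) -> bool:
--     # Phase 1: consume the symbol from the front, one character at a time.
--     it = iter(market_clean)
--     for want in symbol:
--         got = next(it, None)
--         if got != want:
--             return False
--     # Phase 2: parallel multi-pattern scan over the remaining characters:
--     # keep the set of suffix candidates still alive, advancing each by one
--     # character per input character (no pattern strings are ever built).
--     live = list(_SUFFIXES)
--     for ch in it:
--         live = [c[1:] for c in live if c and c[0] == ch]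
--         if not live:
--             return False
--     return '' in live
-- ===== Notes on version B (the rewrite author's own statement) =====
-- stated objective: alternative
-- what changed: A builds each of 20 candidate pattern strings from symbol and compares market_clean to each whole string; B never builds a pattern: it makes a single left-to-right character scan that first consumes the symbol char-by-char and then runs a parallel multi-pattern matcher over a live set of candidate suffixes, filtering and advancing them one character per input character.
import Mathlib
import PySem

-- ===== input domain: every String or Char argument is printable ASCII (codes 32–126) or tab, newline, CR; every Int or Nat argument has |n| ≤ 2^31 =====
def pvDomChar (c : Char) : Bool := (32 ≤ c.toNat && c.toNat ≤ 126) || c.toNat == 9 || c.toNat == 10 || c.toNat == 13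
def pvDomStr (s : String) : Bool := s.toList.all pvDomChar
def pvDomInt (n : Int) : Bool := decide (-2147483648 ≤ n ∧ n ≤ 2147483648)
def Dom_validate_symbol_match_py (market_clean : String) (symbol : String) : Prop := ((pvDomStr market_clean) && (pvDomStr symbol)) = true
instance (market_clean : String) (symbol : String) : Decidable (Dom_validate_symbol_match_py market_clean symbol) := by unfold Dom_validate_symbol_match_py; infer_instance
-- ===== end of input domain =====

-- B replaces A's build-20-patterns-and-compare loop by a single character scan: consume the symbol, then run a parallel candidate-suffix matcher (objective: alternative).

-- ===== PORT A =====
def pvQuotesA : List (List Char) :=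
  ["USDT".toList, "USDC".toList, "USD".toList, "EUR".toList,
   "BTC".toList, "ETH".toList, "BUSD".toList, "FDUSD".toList]

def validate_symbol_match_py (market_clean : String) (symbol : String) : Bool :=
  let mc := market_clean.toList
  let sc := symbol.toList
  if pvQuotesA.any (fun q => mc == sc ++ q || mc == sc ++ ('-' :: q)) then true
  else [sc ++ "F0:USTF0".toList, sc ++ "-PERPETUAL".toList,
        sc ++ "_USDT".toList, sc ++ "_USD".toList].any (fun p => mc == p)

-- ===== PORT B =====
-- module-level constants _QUOTES and _SUFFIXES of Source B (interleaved quote/dash-quote order, then derivatives)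
def pvQuotesB : List (List Char) :=
  ["USDT".toList, "USDC".toList, "USD".toList, "EUR".toList,
   "BTC".toList, "ETH".toList, "BUSD".toList, "FDUSD".toList]

def pvSuffixesB : List (List Char) :=
  (pvQuotesB.flatMap (fun q => [q, '-' :: q])) ++
  ["F0:USTF0".toList, "-PERPETUAL".toList, "_USDT".toList, "_USD".toList]

-- phase 1 of Source B: consume symbol from the front of market, one char at a time
def pvConsume : List Char → List Char → Option (List Char)
  | m, [] => some m
  | [], _ :: _ => none
  | c :: m, d :: s => if c == d then pvConsume m s else none

-- phase 2 of Source B: parallel scan advancing the live candidate suffixes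
def pvScan : List Char → List (List Char) → Bool
  | [], live => live.contains ([] : List Char)
  | c :: rest, live =>
      let live' := live.filterMap (fun s => match s with
        | [] => none
        | d :: t => if d == c then some t else none)
      if live'.isEmpty then false else pvScan rest live'

def validate_symbol_match_py_alt (market_clean : String) (symbol : String) : Bool :=
  match pvConsume market_clean.toList symbol.toList with
  | none => false
  | some rest => pvScan rest pvSuffixesB

-- ===== PRECONDITION & SPEC =====
def Spec_validate_symbol_match_py (market_clean : String) (symbol : String) (out : Bool) : Prop := out = validate_symbol_match_py_alt market_clean symbol
instance (market_clean : String) (symbol : String) (out : Bool) : Decidable (Spec_validate_symbol_match_py market_clean symbol out) := by unfold Spec_validate_symbol_match_py; infer_instance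

-- ===== CLAIM =====
def Claim_equal_validate_symbol_match_py : Prop := ∀ (market_clean : String) (symbol : String), Dom_validate_symbol_match_py market_clean symbol → Spec_validate_symbol_match_py market_clean symbol (validate_symbol_match_py market_clean symbol)

-- ===== LEMMAS AND PROOFS =====
theorem pvConsume_eq_some (s m r : List Char) :
    pvConsume m s = some r ↔ m = s ++ r := by
  induction s generalizing m with
  | nil => cases m <;> simp [pvConsume]
  | cons d s ih =>
    cases m with
    | nil => simp [pvConsume]
    | cons c m =>
      by_cases h : c = d
      · subst h; simp [pvConsume, ih]
      · simp [pvConsume, h]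

theorem pvScan_iff (rest : List Char) (live : List (List Char)) :
    pvScan rest live = true ↔ rest ∈ live := by
  induction rest generalizing live with
  | nil => simp [pvScan]
  | cons c r ih =>
    have hmem : ∀ (l : List (List Char)),
        r ∈ l.filterMap (fun s => match s with
          | [] => none
          | d :: t => if d == c then some t else none) ↔ (c :: r) ∈ l := by
      intro l
      rw [List.mem_filterMap]
      constructor
      · rintro ⟨s, hs, hf⟩
        cases s with
        | nil => simp at hf
        | cons d t =>
          by_cases hdc : d = c
          · subst hdc
            simp at hf
            subst hf; exact hs
          · simp [hdc] at hf
      · intro h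
        exact ⟨c :: r, h, by simp⟩
    simp only [pvScan]
    by_cases he : (live.filterMap (fun s => match s with
          | [] => none
          | d :: t => if d == c then some t else none)).isEmpty
    · rw [if_pos he]
      rw [List.isEmpty_iff] at he
      have hnot : (c :: r) ∉ live := by
        intro hl
        have hr := (hmem live).mpr hl
        rw [he] at hr
        exact List.not_mem_nil hr
      simp [hnot]
    · rw [if_neg he, ih, hmem]

set_option maxHeartbeats 1000000 in
theorem pv_main (m s : String) :
    validate_symbol_match_py m s = validate_symbol_match_py_alt m s := by
  unfold validate_symbol_match_py validate_symbol_match_py_alt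
  cases h : pvConsume m.toList s.toList with
  | none =>
    have hz : ∀ t : List Char, (m.toList == s.toList ++ t) = false := by
      intro t
      simp only [beq_eq_false_iff_ne, ne_eq]
      intro he
      rw [← pvConsume_eq_some s.toList m.toList t] at he
      rw [h] at he
      simp at he
    simp [hz, pvQuotesA]
  | some rest =>
    have hm : m.toList = s.toList ++ rest := (pvConsume_eq_some _ _ _).mp h
    have hc : ∀ t : List Char, (s.toList ++ rest == s.toList ++ t) = (rest == t) := by
      intro t
      cases hb : (rest == t)
      · simp only [beq_eq_false_iff_ne, ne_eq] at hb ⊢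
        exact fun he => hb ((List.append_right_inj _).mp he)
      · simp only [beq_iff_eq] at hb; simp [hb]
    rw [Bool.eq_iff_iff, pvScan_iff]
    simp only [hm, pvQuotesA, pvQuotesB, pvSuffixesB, List.flatMap_cons, List.flatMap_nil,
      List.append_nil, List.cons_append, List.nil_append,
      List.any_cons, List.any_nil, hc, Bool.if_true_left, Bool.or_false,
      Bool.or_eq_true, beq_iff_eq, List.mem_cons, List.not_mem_nil, or_false,
      decide_eq_true_eq, or_assoc]

-- ===== VERDICT =====
theorem validate_symbol_match_py_spec : Claim_equal_validate_symbol_match_py := by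
  intro m s _
  exact pv_main m s
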